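-- pv_equiv track=rewrite | github.com/andrabogildea/cci | ch5/3.py | getPrev
-- ===== SOURCE A (Python) =====
-- def getPrev(nr):
--     # oposite to next
--     # Find rightmost one that has trailing zeroes and count ones and zeroes after it
--
--     if nr == 0:
--         return -1
--     ct1 = 0
--     n = nr
--     while n & 1 == 1:
--         ct1 += 1
--         n >>= 1
--     ct0 = 0
--     while n & 1 == 0 and n != 0:
--         ct0 += 1
--         n >>= 1
--     if ct0 == 0:
--         return -1
--     # switch pos byte to 0 and 0 everything after
--     pos = ct0 + ct1
--     nr = nr & (~0 << (pos+1))
--     # add ct1 + 1 ones after pos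
--     ones = (1 << (ct1+1)) - 1
--     ones <<= (ct0 - 1)
--     nr |= ones
--     return nr
-- ===== SOURCE B (Python) =====
-- def getPrev(nr):
--     # Different decomposition: work over the list of set-bit positions instead of
--     # trailing-ones/zeros counters and mask tricks.
--     bits = []
--     m, i = nr, 0
--     while m > 0:
--         if m % 2 == 1:
--             bits.append(i)
--         m //= 2
--         i += 1
--     # lowest set bit p with an empty slot just below it; k = number of set bits below p
--     p, k = None, 0
--     for b in bits:
--         if b > 0 and (b - 1) not in bits:
--             p = b
--             break
--         k += 1
--     if p is None:
--         return -1
--     # keep the bits above p; pack the k low ones plus the moved bit as a block ending at p-1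
--     result = sum(2**b for b in bits if b > p)
--     for j in range(p - 1 - k, p):
--         result += 2**j
--     return result
-- ===== Notes on version B (the rewrite author's own statement) =====
-- stated objective: alternative
-- what changed: B builds the list of set-bit positions, scans it for the lowest set bit with an empty slot below, and reassembles the integer from positions (high bits kept, a block of ones packed just below the gap), replacing A's trailing-ones/trailing-zeros counting and mask-shift bit tricks.
-- outside the precondition, e.g. on getPrev(-2): A returns -3, B returns -1; on getPrev(-1): A does not finish within the time limit, B returns -1
import Mathlib
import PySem

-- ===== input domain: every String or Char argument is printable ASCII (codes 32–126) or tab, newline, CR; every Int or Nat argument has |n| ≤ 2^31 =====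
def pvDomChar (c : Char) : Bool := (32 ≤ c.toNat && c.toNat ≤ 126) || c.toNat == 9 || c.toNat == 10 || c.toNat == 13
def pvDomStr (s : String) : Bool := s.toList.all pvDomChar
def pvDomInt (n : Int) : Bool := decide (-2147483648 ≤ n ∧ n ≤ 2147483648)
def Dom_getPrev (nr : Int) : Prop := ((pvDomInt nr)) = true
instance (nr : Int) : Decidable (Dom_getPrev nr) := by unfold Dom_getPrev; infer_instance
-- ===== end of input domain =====

-- B rebuilds the answer from the list of set-bit positions instead of A's
-- trailing-ones/zeros counting with mask-and-shift construction (objective: alternative).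

-- ===== PORT A =====
-- fuel-totalised while-loops: within Pre_ ∩ Dom (0 ≤ nr ≤ 2^31) each loop runs at most
-- 33 times, so fuel 64 never cuts the loop short; fuel only makes the loops total.
def getPrevLoop1 : Nat → Int → Nat × Int
  | 0, n => (0, n)
  | fuel+1, n =>
    if PySem.Int.band n 1 = 1 then
      let r := getPrevLoop1 fuel (n >>> (1:Nat))
      (r.1 + 1, r.2)
    else (0, n)

def getPrevLoop0 : Nat → Int → Nat × Int
  | 0, n => (0, n)
  | fuel+1, n =>
    if PySem.Int.band n 1 = 0 ∧ n ≠ 0 then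
      let r := getPrevLoop0 fuel (n >>> (1:Nat))
      (r.1 + 1, r.2)
    else (0, n)

def getPrev (nr : Int) : Int :=
  if nr = 0 then -1
  else
    let p1 := getPrevLoop1 64 nr
    let ct1 := p1.1
    let p0 := getPrevLoop0 64 p1.2
    let ct0 := p0.1
    if ct0 = 0 then -1
    else
      let pos := ct0 + ct1
      let nr1 := PySem.Int.band nr ((Int.not 0) <<< (pos + 1))
      let ones := ((1:Int) <<< (ct1 + 1)) - 1
      let ones1 := ones <<< (ct0 - 1)
      PySem.Int.bor nr1 ones1

-- ===== PORT B =====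
-- while m > 0: collect the set-bit positions of m, low to high
def collectBits (m : Int) (i : Nat) : List Nat :=
  if h : 0 < m then
    (if PySem.Int.mod m 2 = 1 then [i] else []) ++
      collectBits (PySem.Int.floordiv m 2) (i + 1)
  else []
termination_by m.toNat
decreasing_by
  have h1 : PySem.Int.floordiv m 2 < m := by
    rw [PySem.Int.floordiv_lt_iff_lt_mul (by norm_num : (0:Int) < 2)]; omega
  have h2 : (0:Int) ≤ PySem.Int.floordiv m 2 := by
    rw [PySem.Int.le_floordiv_iff_mul_le (by norm_num : (0:Int) < 2)]; omega
  omega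

def findGap (bits : List Nat) : List Nat → Nat → Option (Nat × Nat)
  | [], _ => none
  | b :: rest, k =>
    if 0 < b ∧ (b - 1) ∉ bits then some (b, k) else findGap bits rest (k + 1)

def getPrev_alt (nr : Int) : Int :=
  let bits := collectBits nr 0
  match findGap bits bits 0 with
  | none => -1
  | some (p, k) =>
    let result := ((bits.filter (fun b => decide (p < b))).map (fun b => (2:Int) ^ b)).sum
    (PySem.List.pyRange ((p:Int) - 1 - (k:Int)) (p:Int) 1).foldl
      (fun r j => r + (2:Int) ^ j.toNat) result

-- ===== PRECONDITION & SPEC =====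
-- Pre_ restricts to the natural domain of this bit-count task: nonnegative integers.
-- On negatives A diverges at nr = -1 and otherwise returns two's-complement artefacts of
-- its mask arithmetic, which B (which enumerates the finitely many set bits) does not reproduce.
def Pre_getPrev (nr : Int) : Prop := 0 ≤ nr
instance (nr : Int) : Decidable (Pre_getPrev nr) := by unfold Pre_getPrev; infer_instance

def pvWitness_getPrev : Int := 12

def Spec_getPrev (nr : Int) (out : Int) : Prop := out = getPrev_alt nr
instance (nr : Int) (out : Int) : Decidable (Spec_getPrev nr out) := by unfold Spec_getPrev; infer_instance

-- ===== CLAIM (what is proved, stated in full; the proofs are below) =====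
def Claim_equal_getPrev : Prop := ∀ (nr : Int), Dom_getPrev nr → Pre_getPrev nr → Spec_getPrev nr (getPrev nr)

-- ===== LEMMAS AND PROOFS =====

theorem pow_le_thirtytwo {t : Nat} (h : (2:Int) ^ t ≤ 2 ^ 32) : t ≤ 32 := by
  by_contra hc
  have h2 : (2:Int) ^ 33 ≤ 2 ^ t := pow_le_pow_right₀ (by norm_num) (by omega)
  norm_num at h2; omega

theorem band1 (n : Int) : PySem.Int.band n 1 = n % 2 := by
  rw [PySem.Int.band_one]; simp [PySem.Int.mod, Int.fmod_eq_emod]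

theorem shiftR1 (x : Int) : (2 * x) >>> (1:Nat) = x := by
  rw [Int.shiftRight_eq_div_pow]; omega

theorem shiftR1' (x : Int) : (2 * x + 1) >>> (1:Nat) = x := by
  rw [Int.shiftRight_eq_div_pow]; omega

theorem loop1_spec (k : Nat) : ∀ (fuel : Nat) (a : Int), a % 2 = 0 → k ≤ fuel →
    getPrevLoop1 fuel (a * 2 ^ k + 2 ^ k - 1) = (k, a) := by
  induction k with
  | zero =>
    intro fuel a he _
    cases fuel with
    | zero => simp [getPrevLoop1]
    | succ f =>
      rw [getPrevLoop1]
      rw [if_neg (by rw [band1]; simp; omega)]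
      simp
  | succ s ih =>
    intro fuel a he hf
    cases fuel with
    | zero => omega
    | succ f =>
      have hodd : (a * 2 ^ (s+1) + 2 ^ (s+1) - 1) % 2 = 1 := by
        rw [show a * 2 ^ (s+1) + 2 ^ (s+1) - 1 = 2 * (a * 2 ^ s + 2 ^ s - 1) + 1 by ring]
        omega
      rw [getPrevLoop1, if_pos (by rw [band1]; omega)]
      rw [show a * 2 ^ (s+1) + 2 ^ (s+1) - 1 = 2 * (a * 2 ^ s + 2 ^ s - 1) + 1 by ring,
        shiftR1', ih f a he (by omega)]

theorem loop0_zero (fuel : Nat) : getPrevLoop0 fuel 0 = (0, 0) := by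
  cases fuel <;> simp [getPrevLoop0]

theorem loop0_spec (z : Nat) : ∀ (fuel : Nat) (m : Int), 0 ≤ m → 1 ≤ z → z ≤ fuel →
    getPrevLoop0 fuel ((2 * m + 1) * 2 ^ z) = (z, 2 * m + 1) := by
  induction z with
  | zero => intro fuel m _ h _; omega
  | succ s ih =>
    intro fuel m hm _ hf
    cases fuel with
    | zero => omega
    | succ f =>
      have hpos : (0:Int) < (2 * m + 1) * 2 ^ s := by positivity
      rw [getPrevLoop0, if_pos ⟨by
          rw [band1, show (2*m+1) * 2 ^ (s+1) = 2 * ((2*m+1) * 2 ^ s) by ring]; omega,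
        by positivity⟩]
      rw [show (2*m+1) * 2 ^ (s+1) = 2 * ((2*m+1) * 2 ^ s) by ring, shiftR1]
      rcases Nat.eq_zero_or_pos s with hs | hs
      · subst hs
        cases f with
        | zero => simp [getPrevLoop0]
        | succ f' =>
          rw [getPrevLoop0]
          have hc : ¬(PySem.Int.band ((2*m+1) * 2^0) 1 = 0 ∧ ((2*m+1) * 2^0 : Int) ≠ 0) := by
            rw [band1]; norm_num
          rw [if_neg hc]
          norm_num
      · rw [ih f m hm hs (by omega)]

theorem nat_lor_disjoint (x y s : Nat) (h : y < 2 ^ s) : (x * 2 ^ s) ||| y = x * 2 ^ s + y := by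
  apply Nat.eq_of_testBit_eq
  intro i
  rw [Nat.testBit_lor, Nat.testBit_mul_two_pow,
    show x * 2 ^ s + y = 2 ^ s * x + y by ring, Nat.testBit_two_pow_mul_add x h i]
  by_cases hi : i < s
  · simp [hi, Nat.not_le.mpr hi]
  · rw [if_neg hi]
    have hy : y.testBit i = false := Nat.testBit_lt_two_pow (lt_of_lt_of_le h (Nat.pow_le_pow_right (by norm_num) (by omega)))
    simp [hy, Nat.le_of_not_lt hi]

theorem band_mask (x m : Int) (s : Nat) (hm : 0 ≤ m)
    (hr0 : 0 ≤ x - m * 2 ^ s) (hr1 : x - m * 2 ^ s < 2 ^ s) :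
    PySem.Int.band x ((Int.not 0) <<< s) = m * 2 ^ s := by
  have hx : 0 ≤ x := by nlinarith [pow_nonneg (by norm_num : (0:Int) ≤ 2) s]
  have hs : (Int.not 0) <<< s = -(2 ^ s) := by
    rw [Int.shiftLeft_eq]
    rw [show Int.not 0 = -1 from rfl]; ring
  rw [hs]
  have hpow : (0:Int) < 2 ^ s := by positivity
  have hneg : ¬ (0:Int) ≤ -(2 ^ s) := by omega
  have hS : (((2:Nat) ^ s : Nat) : Int) = (2:Int) ^ s := by push_cast; ring
  have hmm : ((m.toNat * 2 ^ s : Nat) : Int) = m * 2 ^ s := by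
    push_cast [Int.toNat_of_nonneg hm]; ring
  simp only [PySem.Int.band]
  rw [if_pos hx, if_neg hneg]
  have e1 : (-(-((2:Int) ^ s)) - 1).toNat = 2 ^ s - 1 := by omega
  rw [e1, Nat.and_two_pow_sub_one_eq_mod]
  have hXdecomp : x.toNat = m.toNat * 2 ^ s + (x - m * 2 ^ s).toNat := by omega
  have hRS : (x - m * 2 ^ s).toNat < 2 ^ s := by omega
  rw [hXdecomp, Nat.mul_add_mod', Nat.mod_eq_of_lt hRS, Nat.add_sub_cancel, hmm]

theorem bor_disjoint (m y : Int) (s : Nat) (hm : 0 ≤ m) (hy : 0 ≤ y) (h : y < 2 ^ s) :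
    PySem.Int.bor (m * 2 ^ s) y = m * 2 ^ s + y := by
  have h1 : (0:Int) ≤ m * 2 ^ s := by positivity
  rw [show m * 2 ^ s = ((m.toNat * 2 ^ s : Nat) : Int) by push_cast; rw [Int.toNat_of_nonneg hm],
    show y = ((y.toNat : Nat) : Int) by rw [Int.toNat_of_nonneg hy],
    PySem.Int.bor_natCast, nat_lor_disjoint _ _ _ (by
      have h2 : (((2:Nat) ^ s : Nat) : Int) = (2:Int) ^ s := by push_cast; ring
      omega)]
  push_cast; ring

theorem getPrev_ones (k : Nat) (hk : k ≤ 64) : getPrev ((2:Int) ^ k - 1) = -1 := by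
  rcases Nat.eq_zero_or_pos k with h0 | hpos
  · subst h0; norm_num [getPrev]
  · have hne : (2:Int) ^ k - 1 ≠ 0 := by
      have h2 : (2:Int) ^ 1 ≤ 2 ^ k := pow_le_pow_right₀ (by norm_num) hpos
      norm_num at h2 ⊢; omega
    have h1 : getPrevLoop1 64 ((2:Int) ^ k - 1) = (k, 0) := by
      have h := loop1_spec k 64 0 (by norm_num) hk
      rw [show (0:Int) * 2 ^ k + 2 ^ k - 1 = 2 ^ k - 1 by ring] at h
      exact h
    unfold getPrev
    rw [if_neg hne]
    simp only [h1, loop0_zero]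
    simp

theorem getPrev_main (k z : Nat) (m : Int) (hm : 0 ≤ m) (hz : 1 ≤ z) (hk : k ≤ 64) (hzf : z ≤ 64) :
    getPrev ((2 * m + 1) * 2 ^ (k + z) + 2 ^ k - 1)
      = m * 2 ^ (k + z + 1) + ((2:Int) ^ (k + 1) - 1) * 2 ^ (z - 1) := by
  have hp2k : (1:Int) ≤ 2 ^ k := one_le_pow₀ one_le_two
  have hp2kz : (0:Int) < 2 ^ (k+z) := by positivity
  have hle : (2:Int) ^ (k+z) ≤ (2*m+1) * 2^(k+z) := by nlinarith
  have hne : (2 * m + 1) * 2 ^ (k + z) + 2 ^ k - 1 ≠ 0 := by omega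
  have hzsplit : (2:Int) ^ z = 2 * 2 ^ (z-1) := by
    rw [← pow_succ']; congr 1; omega
  have ha_even : ((2*m+1) * 2^z) % 2 = 0 := by
    rw [show (2*m+1) * 2^z = 2 * ((2*m+1) * 2^(z-1)) by rw [hzsplit]; ring]
    exact Int.mul_emod_right 2 _
  have h1 : getPrevLoop1 64 ((2 * m + 1) * 2 ^ (k + z) + 2 ^ k - 1)
      = (k, (2*m+1) * 2^z) := by
    have h := loop1_spec k 64 ((2*m+1) * 2^z) ha_even hk
    rw [show (2*m+1) * 2^z * 2^k + 2^k - 1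
        = (2 * m + 1) * 2 ^ (k + z) + 2 ^ k - 1 by
      rw [show k + z = z + k by omega, pow_add]; ring] at h
    exact h
  have h0 : getPrevLoop0 64 ((2*m+1) * 2^z) = (z, 2*m+1) := loop0_spec z 64 m hm hz hzf
  unfold getPrev
  rw [if_neg hne]
  simp only [h1, h0]
  rw [if_neg (show ¬((z, 2*m+1).1 = 0) by simp; omega)]
  -- band step: nr = m * 2^(z+k+1) + (2^(k+z) + 2^k - 1)
  have hband : PySem.Int.band ((2 * m + 1) * 2 ^ (k + z) + 2 ^ k - 1) ((Int.not 0) <<< (z + k + 1))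
      = m * 2 ^ (z + k + 1) := by
    apply band_mask
    · exact hm
    · have e : (2:Int) ^ (z+k+1) = 2 * 2 ^ (k+z) := by
        rw [← pow_succ']; congr 1; omega
      have e2 : (2 * m + 1) * 2 ^ (k + z) + 2 ^ k - 1 - m * 2 ^ (z+k+1)
          = 2 ^ (k+z) + 2 ^ k - 1 := by rw [e]; ring
      rw [e2]; omega
    · have e : (2:Int) ^ (z+k+1) = 2 * 2 ^ (k+z) := by
        rw [← pow_succ']; congr 1; omega
      have e2 : (2 * m + 1) * 2 ^ (k + z) + 2 ^ k - 1 - m * 2 ^ (z+k+1)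
          = 2 ^ (k+z) + 2 ^ k - 1 := by rw [e]; ring
      have hkk : (2:Int) ^ k ≤ 2 ^ (k+z) := pow_le_pow_right₀ (by norm_num) (by omega)
      rw [e2, e]; omega
  rw [hband]
  have hones : ((1:Int) <<< (k + 1) - 1) <<< (z - 1) = ((2:Int) ^ (k+1) - 1) * 2 ^ (z-1) := by
    rw [Int.shiftLeft_eq, Int.shiftLeft_eq, one_mul]
  rw [hones]
  have hy0 : (0:Int) ≤ ((2:Int) ^ (k+1) - 1) * 2 ^ (z-1) := by
    have h6 : (1:Int) ≤ 2 ^ (k+1) := one_le_pow₀ one_le_two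
    have h7 : (0:Int) ≤ 2 ^ (z-1) := by positivity
    nlinarith
  have hylt : ((2:Int) ^ (k+1) - 1) * 2 ^ (z-1) < 2 ^ (z+k+1) := by
    have e3 : (2:Int) ^ (k+1) * 2 ^ (z-1) = 2 ^ (k+z) := by
      rw [← pow_add]; congr 1; omega
    have e4 : (2:Int) ^ (z+k+1) = 2 * 2 ^ (k+z) := by rw [← pow_succ']; congr 1; omega
    have h5 : (0:Int) < 2 ^ (z-1) := by positivity
    nlinarith
  rw [bor_disjoint m _ _ hm hy0 hylt]
  rw [show z + k + 1 = k + z + 1 by omega]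

theorem fd_odd (m : Int) : PySem.Int.floordiv (2*m+1) 2 = m := by
  simp only [PySem.Int.floordiv]
  rw [show 2*m+1 = 1 + m*2 by ring, Int.add_mul_fdiv_right _ _ (by norm_num)]
  norm_num [Int.fdiv]

theorem fd_even (m : Int) : PySem.Int.floordiv (2*m) 2 = m := by
  simp only [PySem.Int.floordiv]
  exact Int.mul_fdiv_cancel_left _ (by norm_num)

theorem collectBits_nonpos (m : Int) (i : Nat) (h : m ≤ 0) : collectBits m i = [] := by
  rw [collectBits]; simp [Int.not_lt.mpr h]

theorem collectBits_odd (m : Int) (i : Nat) (h : 0 ≤ m) :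
    collectBits (2 * m + 1) i = i :: collectBits m (i + 1) := by
  rw [collectBits]
  rw [if_pos (by simp [PySem.Int.mod] : PySem.Int.mod (2*m+1) 2 = 1), fd_odd]
  simp [show (0:Int) < 2*m+1 by omega]

theorem collectBits_even (m : Int) (i : Nat) (h : 0 < m) :
    collectBits (2 * m) i = collectBits m (i + 1) := by
  rw [collectBits]
  rw [if_neg (by simp [PySem.Int.mod] : ¬ PySem.Int.mod (2*m) 2 = 1), fd_even]
  simp [show (0:Int) < 2*m by omega]

theorem collectBits_ones (k : Nat) (a : Int) (ha : 0 ≤ a) (i : Nat) :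
    collectBits (a * 2 ^ k + 2 ^ k - 1) i = List.range' i k ++ collectBits a (i + k) := by
  induction k generalizing i with
  | zero => simp
  | succ s ih =>
    have he : a * 2 ^ (s+1) + 2 ^ (s+1) - 1 = 2 * (a * 2 ^ s + 2 ^ s - 1) + 1 := by ring
    have hp1 : (0:Int) ≤ a * 2 ^ s := by positivity
    have hp2 : (1:Int) ≤ 2 ^ s := one_le_pow₀ one_le_two
    have hnn : 0 ≤ a * 2 ^ s + 2 ^ s - 1 := by omega
    rw [he, collectBits_odd _ _ hnn, ih, List.range'_succ,
      show i + 1 + s = i + (s + 1) by omega]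
    simp

theorem collectBits_shift (z : Nat) (m : Int) (hm : 0 ≤ m) (i : Nat) :
    collectBits (m * 2 ^ z) i = collectBits m (i + z) := by
  induction z generalizing i with
  | zero => simp
  | succ s ih =>
    rcases eq_or_lt_of_le hm with h0 | hpos
    · rw [← h0]; simp [collectBits_nonpos]
    · have he : m * 2 ^ (s+1) = 2 * (m * 2 ^ s) := by ring
      rw [he, collectBits_even _ _ (by positivity), ih]
      congr 1; omega

theorem collectBits_ge (m : Int) (i : Nat) : ∀ b ∈ collectBits m i, i ≤ b := by
  rw [collectBits]
  split
  · next h =>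
    intro b hb
    have h1 : PySem.Int.floordiv m 2 < m := by
      rw [PySem.Int.floordiv_lt_iff_lt_mul (by norm_num : (0:Int) < 2)]; omega
    have h2 : (0:Int) ≤ PySem.Int.floordiv m 2 := by
      rw [PySem.Int.le_floordiv_iff_mul_le (by norm_num : (0:Int) < 2)]; omega
    rcases List.mem_append.mp hb with h' | h'
    · split at h' <;> simp_all
    · have := collectBits_ge (PySem.Int.floordiv m 2) (i+1) b h'
      omega
  · simp
termination_by m.toNat
decreasing_by omega

theorem collectBits_sum (m : Int) (hm : 0 ≤ m) (i : Nat) :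
    ((collectBits m i).map (fun b => (2:Int) ^ b)).sum = m * 2 ^ i := by
  rcases eq_or_lt_of_le hm with h0 | hpos
  · rw [← h0]; simp [collectBits_nonpos]
  · rcases Int.even_or_odd m with ⟨h, rfl⟩ | ⟨h, rfl⟩
    · have hh : 0 < h := by omega
      rw [show h + h = 2 * h by ring, collectBits_even _ _ hh,
        collectBits_sum h (by omega) (i + 1)]
      ring
    · have hh : 0 ≤ h := by omega
      rw [collectBits_odd _ _ hh]
      simp only [List.map_cons, List.sum_cons, collectBits_sum h hh (i + 1)]
      ring
termination_by m.toNat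
decreasing_by all_goals omega

theorem findGap_skip (bits pre rest : List Nat) (k : Nat)
    (h : ∀ b ∈ pre, ¬(0 < b ∧ (b - 1) ∉ bits)) :
    findGap bits (pre ++ rest) k = findGap bits rest (k + pre.length) := by
  induction pre generalizing k with
  | nil => simp
  | cons b t ih =>
    have hb := h b (by simp)
    simp only [List.cons_append, findGap, if_neg hb]
    rw [ih (k + 1) (fun x hx => h x (by simp [hx]))]
    congr 1
    simp [List.length_cons]; omega

theorem range_prefix_fails (bits : List Nat) (k : Nat) (hsub : ∀ x < k, x ∈ bits) :
    ∀ b ∈ List.range' 0 k, ¬(0 < b ∧ (b - 1) ∉ bits) := by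
  intro b hb
  rw [List.mem_range'] at hb
  rintro ⟨hpos, hnot⟩
  exact hnot (hsub (b - 1) (by omega))

theorem range_fold (c : Nat) : ∀ (a : Int) (init : Int), 0 ≤ a →
    (PySem.List.pyRange a (a + c) 1).foldl (fun r j => r + (2:Int) ^ j.toNat) init
      = init + 2 ^ (a.toNat + c) - 2 ^ a.toNat := by
  induction c with
  | zero => intro a init ha; rw [PySem.List.pyRange_one_eq_nil (by omega)]; simp
  | succ s ih =>
    intro a init ha
    rw [PySem.List.pyRange_one_cons (by omega), List.foldl_cons,
      show a + (s + 1 : Nat) = (a + 1) + (s : Nat) by push_cast; ring,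
      ih (a + 1) _ (by omega),
      show (a + 1).toNat = a.toNat + 1 by omega]
    ring

theorem range_fold' (a b init : Int) (ha : 0 ≤ a) (hab : a ≤ b) :
    (PySem.List.pyRange a b 1).foldl (fun r j => r + (2:Int) ^ j.toNat) init
      = init + 2 ^ b.toNat - 2 ^ a.toNat := by
  have h := range_fold (b - a).toNat a init ha
  rw [show a + ((b - a).toNat : Int) = b by omega] at h
  rw [h, show a.toNat + (b - a).toNat = b.toNat by omega]

theorem getPrev_alt_ones (k : Nat) : getPrev_alt ((2:Int) ^ k - 1) = -1 := by
  have hb : collectBits ((2:Int) ^ k - 1) 0 = List.range' 0 k := by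
    rw [show (2:Int) ^ k - 1 = 0 * 2 ^ k + 2 ^ k - 1 by ring,
      collectBits_ones k 0 le_rfl 0, collectBits_nonpos 0 _ le_rfl]
    simp
  have h1 : findGap (List.range' 0 k) (List.range' 0 k ++ []) 0 = none := by
    rw [findGap_skip _ _ _ _ (range_prefix_fails _ k (by intro x hx; simp; omega))]
    simp [findGap]
  simp only [List.append_nil] at h1
  unfold getPrev_alt
  simp only [hb, h1]

theorem getPrev_alt_main (k z : Nat) (m : Int) (hm : 0 ≤ m) (hz : 1 ≤ z) :
    getPrev_alt ((2 * m + 1) * 2 ^ (k + z) + 2 ^ k - 1)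
      = m * 2 ^ (k + z + 1) + ((2:Int) ^ (k + 1) - 1) * 2 ^ (z - 1) := by
  set p := k + z with hp
  set H := collectBits m (p + 1) with hH0
  have hH : ∀ b ∈ H, p + 1 ≤ b := collectBits_ge m (p + 1)
  have hb : collectBits ((2 * m + 1) * 2 ^ p + 2 ^ k - 1) 0
      = List.range' 0 k ++ (p :: H) := by
    rw [hH0, hp]
    rw [show (2 * m + 1) * 2 ^ (k + z) + 2 ^ k - 1
        = ((2 * m + 1) * 2 ^ z) * 2 ^ k + 2 ^ k - 1 by rw [pow_add]; ring,
      collectBits_ones k _ (by positivity) 0,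
      show (0 + k : Nat) = k by omega,
      collectBits_shift z (2 * m + 1) (by omega) k,
      collectBits_odd m (k + z) hm]
  have hsub : ∀ x < k, x ∈ List.range' 0 k ++ (p :: H) := by
    intro x hx; rw [List.mem_append, List.mem_range'_1]; left; omega
  have hnotmem : (p - 1) ∉ List.range' 0 k ++ (p :: H) := by
    intro hmem
    rcases List.mem_append.mp hmem with h | h
    · rw [List.mem_range'_1] at h; omega
    · rcases List.mem_cons.mp h with h | h
      · omega
      · have := hH _ h; omega
  have hfg : findGap (List.range' 0 k ++ (p :: H)) (List.range' 0 k ++ (p :: H)) 0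
      = some (p, k) := by
    rw [findGap_skip _ _ _ _ (range_prefix_fails _ k hsub)]
    rw [findGap]
    rw [if_pos ⟨by omega, hnotmem⟩]
    simp
  have hfil : (List.range' 0 k ++ (p :: H)).filter (fun b => decide (p < b)) = H := by
    rw [List.filter_append, List.filter_cons]
    have h1 : (List.range' 0 k).filter (fun b => decide (p < b)) = [] := by
      rw [List.filter_eq_nil_iff]
      intro b hb; rw [List.mem_range'_1] at hb; simp; omega
    have h2 : H.filter (fun b => decide (p < b)) = H := by
      rw [List.filter_eq_self]
      intro b hb; have := hH _ hb; simp; omega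
    simp [h1, h2]
  unfold getPrev_alt
  rw [show (2 * m + 1) * 2 ^ (k + z) + 2 ^ k - 1
      = (2 * m + 1) * 2 ^ p + 2 ^ k - 1 by rw [hp]]
  simp only [hb, hfg, hfil]
  rw [hH0, collectBits_sum m hm (p + 1),
    range_fold' _ _ _ (by omega) (by omega),
    show ((p:Int)).toNat = p by omega,
    show ((p:Int) - 1 - (k:Int)).toNat = z - 1 by omega]
  have e1 : (2:Int) ^ p = 2 ^ (k + 1) * 2 ^ (z - 1) := by
    rw [← pow_add]; congr 1; omega
  rw [hp, e1]; ring

theorem decomp_ones (n : Int) (hn : 0 ≤ n) :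
    ∃ (k : Nat) (a : Int), 0 ≤ a ∧ a % 2 = 0 ∧ n = a * 2 ^ k + 2 ^ k - 1 := by
  rcases Int.even_or_odd n with ⟨h, rfl⟩ | ⟨h, rfl⟩
  · exact ⟨0, h + h, by omega, by omega, by norm_num⟩
  · have hh : 0 ≤ h := by omega
    obtain ⟨k, a, ha, he, hd⟩ := decomp_ones h hh
    exact ⟨k + 1, a, ha, he, by rw [hd]; ring⟩
termination_by n.toNat
decreasing_by omega

theorem decomp_even (a : Int) (ha : 0 < a) (he : a % 2 = 0) :
    ∃ (z : Nat) (m : Int), 0 ≤ m ∧ 1 ≤ z ∧ a = (2 * m + 1) * 2 ^ z := by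
  obtain ⟨c, rfl⟩ : ∃ c, a = 2 * c := ⟨a / 2, by omega⟩
  have hc : 0 < c := by omega
  rcases Int.even_or_odd c with ⟨d, rfl⟩ | ⟨d, rfl⟩
  · obtain ⟨z, m, hm, hz, hd⟩ := decomp_even (d + d) (by omega) (by omega)
    exact ⟨z + 1, m, hm, by omega, by rw [show 2 * (d + d) = 2 * ((2*m+1) * 2^z) from by rw [← hd], pow_succ]; ring⟩
  · exact ⟨1, d, by omega, le_rfl, by norm_num; ring⟩
termination_by a.toNat
decreasing_by omega

theorem final_test (nr : Int) (hd1 : nr ≤ 2147483648) (hpre : 0 ≤ nr) :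
    getPrev nr = getPrev_alt nr := by
  obtain ⟨k, a, ha, he, rfl⟩ := decomp_ones nr hpre
  have hak : (0:Int) ≤ a * 2 ^ k := by positivity
  have h1k : (1:Int) ≤ 2 ^ k := one_le_pow₀ one_le_two
  have hk32 : k ≤ 64 := by
    apply le_trans _ (by norm_num : 32 ≤ 64)
    apply pow_le_thirtytwo
    have : (2:Int) ^ k ≤ 2147483649 := by omega
    omega
  rcases eq_or_lt_of_le ha with h0 | hpos
  · rw [← h0]
    rw [show (0:Int) * 2 ^ k + 2 ^ k - 1 = 2 ^ k - 1 by ring]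
    rw [getPrev_ones k hk32, getPrev_alt_ones k]
  · obtain ⟨z, m, hm, hz, rfl⟩ := decomp_even a hpos he
    have h2z : (1:Int) ≤ 2 ^ z := one_le_pow₀ one_le_two
    have hmz : (2:Int) ^ z ≤ (2*m+1) * 2 ^ z := by nlinarith
    have haa : (2*m+1) * 2 ^ z ≤ (2*m+1) * 2 ^ z * 2 ^ k := by nlinarith
    have hz32 : z ≤ 64 := by
      apply le_trans _ (by norm_num : 32 ≤ 64)
      apply pow_le_thirtytwo
      have : (2:Int) ^ z ≤ 2147483649 := by omega
      omega
    have hrw : (2*m+1) * 2 ^ z * 2 ^ k + 2 ^ k - 1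
        = (2*m+1) * 2 ^ (k + z) + 2 ^ k - 1 := by
      rw [show k + z = z + k by omega, pow_add]; ring
    rw [hrw, getPrev_main k z m hm hz hk32 hz32, getPrev_alt_main k z m hm hz]

-- ===== VERDICT (by name: the statement is the Claim_ definition above) =====
theorem getPrev_spec : Claim_equal_getPrev := by
  intro nr hdom hpre
  unfold Spec_getPrev
  have hd : nr ≤ 2147483648 := by
    unfold Dom_getPrev pvDomInt at hdom
    simp at hdom
    exact hdom.2
  exact final_test nr hd hpre
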